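-- pv_equiv track=rewrite | github.com/nexon33/voynich-grammar-analysis | scripts/semantic_validation/test1_recipe_patterns.py | has_pattern_sequence
-- ===== SOURCE A (Python) =====
-- def has_pattern_sequence(tokens, pattern_elements, window=5):
--     """
--     Check if tokens contain pattern elements in order (within window).
--
--     Args:
--         tokens: List of words in sentence
--         pattern_elements: List of elements to find in sequence
--         window: Maximum distance between elements
--
--     Returns:
--         True if pattern found, False otherwise
--     """
--     if not pattern_elements:
--         return False
--
--     # Find positions of each pattern element
--     positions = []
--     for element in pattern_elements:
--         found_positions = []
--         for i, token in enumerate(tokens):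
--             if element in token:
--                 found_positions.append(i)
--         if not found_positions:
--             return False  # Element not found at all
--         positions.append(found_positions)
--
--     # Check if we can find a valid sequence
--     def check_sequence(pos_lists, current_pos=-1, depth=0):
--         if depth >= len(pos_lists):
--             return True
--
--         for pos in pos_lists[depth]:
--             if pos > current_pos and (current_pos == -1 or pos - current_pos <= window):
--                 if check_sequence(pos_lists, pos, depth + 1):
--                     return True
--         return False
--
--     return check_sequence(positions)
-- ===== SOURCE B (Python) =====
-- def has_pattern_sequence(tokens, pattern_elements, window=5):
--     """Forward DP: keep the sorted list of positions a valid chain can end at,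
--     updated by a two-pointer merge per pattern element."""
--     if not pattern_elements:
--         return False
--     first = True
--     reachable = []
--     for element in pattern_elements:
--         pos = [i for i, t in enumerate(tokens) if element in t]
--         if first:
--             reachable = pos
--             first = False
--         else:
--             new = []
--             j = 0
--             best = None
--             for p in pos:
--                 while j < len(reachable) and reachable[j] < p:
--                     best = reachable[j]
--                     j += 1
--                 if best is not None and p - best <= window:
--                     new.append(p)
--             reachable = new
--         if not reachable:
--             return False
--     return True
-- ===== Notes on version B (the rewrite author's own statement) =====
-- stated objective: alternative
-- what changed: Replaced the recursive backtracking search over per-element position lists by a forward dynamic program that keeps the sorted list of positions a valid chain can end at, updated by a two-pointer merge per pattern element.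
import Mathlib
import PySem

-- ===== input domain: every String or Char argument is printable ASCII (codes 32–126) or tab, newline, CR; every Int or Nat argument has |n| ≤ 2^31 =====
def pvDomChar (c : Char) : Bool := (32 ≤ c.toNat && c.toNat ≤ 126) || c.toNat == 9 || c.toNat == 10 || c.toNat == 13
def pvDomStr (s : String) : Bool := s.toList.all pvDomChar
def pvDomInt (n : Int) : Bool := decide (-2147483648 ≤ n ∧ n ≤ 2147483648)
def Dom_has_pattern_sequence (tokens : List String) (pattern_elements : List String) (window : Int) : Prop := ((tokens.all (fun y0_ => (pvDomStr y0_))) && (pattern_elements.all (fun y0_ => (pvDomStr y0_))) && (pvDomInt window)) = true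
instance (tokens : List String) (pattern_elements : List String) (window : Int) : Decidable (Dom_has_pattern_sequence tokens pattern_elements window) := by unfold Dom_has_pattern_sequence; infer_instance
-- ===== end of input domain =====

-- B replaces A's recursive backtracking search over per-element position lists by a
-- forward dynamic program over the sorted list of reachable chain-end positions.

-- ===== PORT A =====
-- the inner `for i, token in enumerate(tokens): if element in token: found_positions.append(i)`
def pvFindPositions (tokens : List String) (element : String) : List Int :=
  (PySem.List.enumerate tokens).foldl
    (fun acc it => if PySem.Str.isIn element it.2 then acc ++ [it.1] else acc) []

-- the `for element in pattern_elements` loop building `positions`; early `return False` = none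
def pvBuildPositions (tokens : List String) : List String → Option (List (List Int))
  | [] => some []
  | e :: es =>
    let found := pvFindPositions tokens e
    if found.isEmpty then none
    else
      match pvBuildPositions tokens es with
      | none => none
      | some rest => some (found :: rest)

-- `check_sequence(pos_lists, current_pos, depth)`: the depth recursion, structurally on the lists
def pvCheckSeq (window : Int) : List (List Int) → Int → Bool
  | [], _ => true
  | l :: rest, cur =>
    l.any (fun pos =>
      (decide (pos > cur) && (decide (cur = -1) || decide (pos - cur ≤ window))) &&
      pvCheckSeq window rest pos)

def has_pattern_sequence (tokens : List String) (pattern_elements : List String) (window : Int) : Bool :=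
  if pattern_elements.isEmpty then false
  else
    match pvBuildPositions tokens pattern_elements with
    | none => false
    | some positions => pvCheckSeq window positions (-1)

-- ===== PORT B =====
-- `[i for i, t in enumerate(tokens) if element in t]`
def pvPosOf (tokens : List String) (element : String) : List Int :=
  (PySem.List.enumerate tokens).filterMap
    (fun it => if PySem.Str.isIn element it.2 then some it.1 else none)

-- B's inner `for p in pos:` with the `while` advancing (j, best) = two-pointer merge;
-- the consumed prefix of `reachable` is dropped, `best` is its last element
def pvFilterStep (window : Int) : List Int → List Int → Option Int → List Int
  | [], _, _ => []
  | p :: ps, q :: qs, best =>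
    if q < p then pvFilterStep window (p :: ps) qs (some q)
    else
      match best with
      | some b =>
        if p - b ≤ window then p :: pvFilterStep window ps (q :: qs) best
        else pvFilterStep window ps (q :: qs) best
      | none => pvFilterStep window ps (q :: qs) none
  | p :: ps, [], best =>
    match best with
    | some b =>
      if p - b ≤ window then p :: pvFilterStep window ps [] best
      else pvFilterStep window ps [] best
    | none => pvFilterStep window ps [] none
termination_by pos reach _ => pos.length + reach.length
decreasing_by all_goals simp <;> omega

-- B's `for element in pattern_elements` loop carrying (first, reachable)
def pvAltLoop (tokens : List String) (window : Int) : List String → Bool → List Int → Bool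
  | [], _, _ => true
  | e :: es, first, reachable =>
    let pos := pvPosOf tokens e
    let r := if first then pos
             else pvFilterStep window pos reachable none
    if r.isEmpty then false else pvAltLoop tokens window es false r

def has_pattern_sequence_alt (tokens : List String) (pattern_elements : List String) (window : Int) : Bool :=
  if pattern_elements.isEmpty then false
  else pvAltLoop tokens window pattern_elements true []

-- ===== PRECONDITION & SPEC =====
def Spec_has_pattern_sequence (tokens : List String) (pattern_elements : List String) (window : Int) (out : Bool) : Prop := out = has_pattern_sequence_alt tokens pattern_elements window
instance (tokens : List String) (pattern_elements : List String) (window : Int) (out : Bool) : Decidable (Spec_has_pattern_sequence tokens pattern_elements window out) := by unfold Spec_has_pattern_sequence; infer_instance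

-- ===== CLAIM (what is proved, stated in full; the proofs are below) =====
def Claim_equal_has_pattern_sequence : Prop := ∀ (tokens : List String) (pattern_elements : List String) (window : Int), Dom_has_pattern_sequence tokens pattern_elements window → Spec_has_pattern_sequence tokens pattern_elements window (has_pattern_sequence tokens pattern_elements window)

-- ===== LEMMAS AND PROOFS =====

theorem filterMap_if_eq_map_filter {α β : Type} (P : α → Bool) (f : α → β) :
    ∀ (l : List α),
      l.filterMap (fun x => if P x then some (f x) else none) = (l.filter P).map f := by
  intro l
  induction l with
  | nil => rfl
  | cons x xs ih =>
    by_cases h : P x = true <;>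
      simp [h, ih]

-- the two ways of collecting positions agree
theorem pvFindPositions_eq (tokens : List String) (element : String) :
    pvFindPositions tokens element = pvPosOf tokens element := by
  unfold pvFindPositions pvPosOf
  rw [PySem.List.foldl_append_if, filterMap_if_eq_map_filter]
  simp

-- collected positions are nonnegative indices
theorem pvPosOf_nonneg (tokens : List String) (element : String) :
    ∀ p ∈ pvPosOf tokens element, 0 ≤ p := by
  intro p hp
  unfold pvPosOf at hp
  rw [List.mem_filterMap] at hp
  obtain ⟨it, hit, hif⟩ := hp
  rw [PySem.List.mem_enumerate_iff] at hit
  obtain ⟨k, hk, rfl⟩ := hit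
  split at hif
  · injection hif with h; omega
  · exact absurd hif (by simp)

-- sorted: collected positions are strictly increasing indices
theorem pvPosOf_pairwise (tokens : List String) (element : String) :
    List.Pairwise (· < ·) (pvPosOf tokens element) := by
  unfold pvPosOf
  rw [filterMap_if_eq_map_filter, List.pairwise_map]
  exact List.Pairwise.sublist List.filter_sublist (PySem.List.pairwise_lt_enumerate tokens 0)

-- the two-pointer merge computes exactly the window filter (on sorted inputs)
theorem pvFilterStep_eq_filter (window : Int) :
    ∀ (pos reach : List Int) (best : Option Int),
      List.Pairwise (· < ·) pos → List.Pairwise (· < ·) reach →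
      (∀ b, best = some b → (∀ q ∈ reach, b < q) ∧ (∀ p ∈ pos, b < p)) →
      pvFilterStep window pos reach best =
        pos.filter (fun p => (best.toList ++ reach).any
          (fun q => decide (q < p) && decide (p - q ≤ window))) := by
  intro pos reach best
  induction pos, reach, best using pvFilterStep.induct window with
  | case1 reach best =>
    intro _ _ _
    simp [pvFilterStep]
  | case2 p ps q qs best h ih =>
    intro hpos hreach hbest
    obtain ⟨hq_lt_qs, hqs⟩ := List.pairwise_cons.mp hreach
    obtain ⟨hp_lt_ps, hps⟩ := List.pairwise_cons.mp hpos
    rw [show pvFilterStep window (p :: ps) (q :: qs) best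
        = pvFilterStep window (p :: ps) qs (some q) by rw [pvFilterStep.eq_def]; simp [h]]
    rw [ih hpos hqs (by
      intro b hb
      injection hb with hb; subst hb
      exact ⟨hq_lt_qs, by
        intro p' hp'
        rcases List.mem_cons.mp hp' with rfl | hp'
        · exact h
        · exact lt_trans h (hp_lt_ps p' hp')⟩)]
    apply List.filter_congr
    intro p' hp'
    rcases best with _ | b
    · rfl
    · obtain ⟨hbq, _⟩ := hbest b rfl
      simp only [Option.toList_some, List.cons_append, List.nil_append, List.any_cons]
      cases hfb : (decide (b < p') && decide (p' - b ≤ window)) with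
      | false => simp
      | true =>
        simp only [Bool.true_or]
        simp only [Bool.and_eq_true, decide_eq_true_eq] at hfb
        have hq_lt : q < p' := by
          rcases List.mem_cons.mp hp' with rfl | hp'
          · exact h
          · exact lt_trans h (hp_lt_ps p' hp')
        have hbq' : b < q := hbq q (List.mem_cons_self)
        have : p' - q ≤ window := by omega
        simp [hq_lt, this]
  | case3 p ps q qs h1 b h2 ih =>
    intro hpos hreach hbest
    obtain ⟨hp_lt_ps, hps⟩ := List.pairwise_cons.mp hpos
    obtain ⟨hb_reach, hb_pos⟩ := hbest b rfl
    rw [show pvFilterStep window (p :: ps) (q :: qs) (some b)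
        = p :: pvFilterStep window ps (q :: qs) (some b) by rw [pvFilterStep.eq_def]; simp [h1, h2]]
    rw [List.filter_cons_of_pos (by
      simp only [Option.toList_some, List.cons_append, List.nil_append, List.any_cons,
        Bool.or_eq_true, Bool.and_eq_true, decide_eq_true_eq]
      exact Or.inl ⟨hb_pos p (List.mem_cons_self), h2⟩)]
    rw [ih hps hreach (by intro b' hb; injection hb with hb; subst hb; exact ⟨hb_reach, fun p' hp' => hb_pos p' (List.mem_cons_of_mem _ hp')⟩)]
  | case4 p ps q qs h1 b h2 ih =>
    intro hpos hreach hbest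
    obtain ⟨hp_lt_ps, hps⟩ := List.pairwise_cons.mp hpos
    obtain ⟨hq_lt_qs, hqs⟩ := List.pairwise_cons.mp hreach
    obtain ⟨hb_reach, hb_pos⟩ := hbest b rfl
    rw [show pvFilterStep window (p :: ps) (q :: qs) (some b)
        = pvFilterStep window ps (q :: qs) (some b) by rw [pvFilterStep.eq_def]; simp [h1, h2]]
    rw [List.filter_cons_of_neg (by
      simp only [Option.toList_some, List.cons_append, List.nil_append, List.any_cons,
        Bool.or_eq_true, Bool.and_eq_true, decide_eq_true_eq, List.any_eq_true]
      push_neg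
      refine ⟨fun _ => by omega, fun _ => by omega, ?_⟩
      intro x hx _
      have : q < x := hq_lt_qs x hx
      omega)]
    rw [ih hps hreach (by intro b' hb; injection hb with hb; subst hb; exact ⟨hb_reach, fun p' hp' => hb_pos p' (List.mem_cons_of_mem _ hp')⟩)]
  | case5 p ps q qs h1 ih =>
    intro hpos hreach hbest
    obtain ⟨hp_lt_ps, hps⟩ := List.pairwise_cons.mp hpos
    obtain ⟨hq_lt_qs, hqs⟩ := List.pairwise_cons.mp hreach
    rw [show pvFilterStep window (p :: ps) (q :: qs) none
        = pvFilterStep window ps (q :: qs) none by rw [pvFilterStep.eq_def]; simp [h1]]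
    rw [List.filter_cons_of_neg (by
      simp only [Option.toList_none, List.nil_append, List.any_cons,
        Bool.or_eq_true, Bool.and_eq_true, decide_eq_true_eq, List.any_eq_true]
      push_neg
      refine ⟨fun _ => by omega, ?_⟩
      intro x hx _
      have : q < x := hq_lt_qs x hx
      omega)]
    rw [ih hps hreach (by rintro b' h; exact absurd h (by simp))]
  | case6 p ps b h2 ih =>
    intro hpos hreach hbest
    obtain ⟨hp_lt_ps, hps⟩ := List.pairwise_cons.mp hpos
    obtain ⟨hb_reach, hb_pos⟩ := hbest b rfl
    rw [show pvFilterStep window (p :: ps) [] (some b)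
        = p :: pvFilterStep window ps [] (some b) by rw [pvFilterStep.eq_def]; simp [h2]]
    rw [List.filter_cons_of_pos (by
      simp only [Option.toList_some, List.append_nil, List.any_cons, List.any_nil,
        Bool.or_eq_true, Bool.and_eq_true, decide_eq_true_eq]
      exact Or.inl ⟨hb_pos p (List.mem_cons_self), h2⟩)]
    rw [ih hps hreach (by intro b' hb; injection hb with hb; subst hb; exact ⟨hb_reach, fun p' hp' => hb_pos p' (List.mem_cons_of_mem _ hp')⟩)]
  | case7 p ps b h2 ih =>
    intro hpos hreach hbest
    obtain ⟨hp_lt_ps, hps⟩ := List.pairwise_cons.mp hpos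
    obtain ⟨hb_reach, hb_pos⟩ := hbest b rfl
    rw [show pvFilterStep window (p :: ps) [] (some b)
        = pvFilterStep window ps [] (some b) by rw [pvFilterStep.eq_def]; simp [h2]]
    rw [List.filter_cons_of_neg (by
      simp only [Option.toList_some, List.append_nil, List.any_cons, List.any_nil,
        Bool.or_eq_true, Bool.and_eq_true, decide_eq_true_eq]
      simp [h2])]
    rw [ih hps hreach (by intro b' hb; injection hb with hb; subst hb; exact ⟨hb_reach, fun p' hp' => hb_pos p' (List.mem_cons_of_mem _ hp')⟩)]
  | case8 p ps ih =>
    intro hpos hreach hbest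
    obtain ⟨hp_lt_ps, hps⟩ := List.pairwise_cons.mp hpos
    rw [show pvFilterStep window (p :: ps) [] none
        = pvFilterStep window ps [] none by rw [pvFilterStep.eq_def]]
    rw [List.filter_cons_of_neg (by simp)]
    rw [ih hps hreach (by rintro b' h; exact absurd h (by simp))]

-- with no consumed prefix yet, the merge is the plain window filter
theorem pvFilterStep_none_eq (window : Int) (pos reach : List Int)
    (h1 : List.Pairwise (· < ·) pos) (h2 : List.Pairwise (· < ·) reach) :
    pvFilterStep window pos reach none =
      pos.filter (fun p => reach.any (fun q => decide (q < p) && decide (p - q ≤ window))) := by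
  have h := pvFilterStep_eq_filter window pos reach none h1 h2
    (by intro b hb; exact absurd hb (by simp))
  simpa using h

-- unfolding pvCheckSeq on a cons, with the Bool test read as a Prop
theorem pvCheckSeq_cons_iff (window : Int) (l : List Int) (rest : List (List Int)) (cur : Int) :
    pvCheckSeq window (l :: rest) cur = true ↔
      ∃ p ∈ l, (cur < p ∧ (cur = -1 ∨ p - cur ≤ window)) ∧ pvCheckSeq window rest p = true := by
  simp [pvCheckSeq, List.any_eq_true, and_assoc]

-- membership in B's filtered reachable set, as a Prop
theorem pvFilter_mem_iff (window : Int) (pos r : List Int) (q : Int) :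
    q ∈ pos.filter (fun p => r.any (fun q' => decide (q' < p) && decide (p - q' ≤ window))) ↔
      q ∈ pos ∧ ∃ p ∈ r, p < q ∧ q - p ≤ window := by
  simp [List.mem_filter, List.any_eq_true]

-- main invariant: from a nonempty set r of nonnegative reachable previous positions,
-- B's loop succeeds iff some p ∈ r starts a valid chain through the remaining elements
theorem pvAltLoop_iff (tokens : List String) (window : Int) :
    ∀ (es : List String) (r : List Int), r ≠ [] → (∀ p ∈ r, 0 ≤ p) →
      List.Pairwise (· < ·) r →
      (pvAltLoop tokens window es false r = true ↔
        ∃ p ∈ r, ∃ P, pvBuildPositions tokens es = some P ∧ pvCheckSeq window P p = true) := by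
  intro es
  induction es with
  | nil =>
    intro r hr _ _
    constructor
    · intro _
      obtain ⟨p, hp⟩ := List.exists_mem_of_ne_nil r hr
      exact ⟨p, hp, [], rfl, rfl⟩
    · intro _; rfl
  | cons e es ih =>
    intro r hr h0 hsr
    simp only [pvAltLoop, Bool.false_eq_true, if_false]
    rw [pvFilterStep_none_eq window (pvPosOf tokens e) r (pvPosOf_pairwise tokens e) hsr]
    set pos := pvPosOf tokens e with hposdef
    set r' := pos.filter (fun p =>
        r.any (fun q => decide (q < p) && decide (p - q ≤ window))) with hr'def
    have hbp_cons : ∀ (rest : List (List Int)), pvBuildPositions tokens es = some rest →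
        pos ≠ [] → pvBuildPositions tokens (e :: es) = some (pos :: rest) := by
      intro rest hrest hne
      simp only [pvBuildPositions, pvFindPositions_eq, ← hposdef, hrest]
      rw [if_neg (by simp [List.isEmpty_iff, hne])]
    have hbp_none : pos = [] → pvBuildPositions tokens (e :: es) = none := by
      intro hp
      simp only [pvBuildPositions, pvFindPositions_eq, ← hposdef, hp]
      rfl
    have hRHS : (∃ p ∈ r, ∃ P, pvBuildPositions tokens (e :: es) = some P ∧
          pvCheckSeq window P p = true) ↔
        (∃ q ∈ r', ∃ rest, pvBuildPositions tokens es = some rest ∧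
          pvCheckSeq window rest q = true) := by
      constructor
      · rintro ⟨p, hp, P, hP, hchk⟩
        -- decompose the build on e :: es
        by_cases hpe : pos = []
        · rw [hbp_none hpe] at hP; exact absurd hP (by simp)
        cases hrest' : pvBuildPositions tokens es with
        | none =>
          simp only [pvBuildPositions, pvFindPositions_eq, ← hposdef, hrest'] at hP
          rw [if_neg (by simp [List.isEmpty_iff, hpe])] at hP
          exact absurd hP (by simp)
        | some rest =>
          rw [hbp_cons rest hrest' hpe] at hP
          injection hP with hP; subst hP
          rw [pvCheckSeq_cons_iff] at hchk
          obtain ⟨q, hq, ⟨hlt, hwin⟩, hchk'⟩ := hchk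
          have hp0 : (0:Int) ≤ p := h0 p hp
          have hwin' : q - p ≤ window := by rcases hwin with h | h; omega; exact h
          refine ⟨q, ?_, rest, rfl, hchk'⟩
          rw [hr'def, pvFilter_mem_iff]
          exact ⟨hq, p, hp, hlt, hwin'⟩
      · rintro ⟨q, hq, rest, hrest, hchk⟩
        rw [hr'def, pvFilter_mem_iff] at hq
        obtain ⟨hqpos, p, hp, hlt, hwin⟩ := hq
        have hpe : pos ≠ [] := List.ne_nil_of_mem hqpos
        refine ⟨p, hp, pos :: rest, hbp_cons rest hrest hpe, ?_⟩
        rw [pvCheckSeq_cons_iff]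
        exact ⟨q, hqpos, ⟨hlt, Or.inr hwin⟩, hchk⟩
    by_cases hre : r' = []
    · rw [hRHS, hre]
      simp
    · rw [if_neg (by simpa [List.isEmpty_iff] using hre)]
      rw [hRHS]
      exact ih r' hre (fun p hp => pvPosOf_nonneg tokens e p
        (List.mem_filter.mp (by rw [hr'def] at hp; exact hp)).1)
        (hr'def ▸ List.Pairwise.sublist List.filter_sublist (pvPosOf_pairwise tokens e))

-- ===== VERDICT (by name: the statement is the Claim_ definition above) =====
theorem has_pattern_sequence_spec : Claim_equal_has_pattern_sequence := by
  intro tokens pattern_elements window _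
  unfold Spec_has_pattern_sequence
  cases pattern_elements with
  | nil => rfl
  | cons e es =>
    unfold has_pattern_sequence has_pattern_sequence_alt
    simp only [List.isEmpty_cons, Bool.false_eq_true, if_false]
    simp only [pvAltLoop, if_true]
    set pos := pvPosOf tokens e with hposdef
    by_cases hpe : pos = []
    · have : pvBuildPositions tokens (e :: es) = none := by
        simp only [pvBuildPositions, pvFindPositions_eq, ← hposdef, hpe]; rfl
      rw [this, hpe]
      simp
    · rw [if_neg (by simpa [List.isEmpty_iff] using hpe)]
      have halt := pvAltLoop_iff tokens window es pos hpe (pvPosOf_nonneg tokens e) (pvPosOf_pairwise tokens e)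
      cases hrest : pvBuildPositions tokens es with
      | none =>
        have hA : pvBuildPositions tokens (e :: es) = none := by
          simp only [pvBuildPositions, pvFindPositions_eq, ← hposdef, hrest]
          rw [if_neg (by simp [List.isEmpty_iff, hpe])]
        rw [hA]
        have : pvAltLoop tokens window es false pos = false := by
          rw [Bool.eq_false_iff]
          intro h
          obtain ⟨_, _, _, hP, _⟩ := halt.mp h
          rw [hrest] at hP; exact absurd hP (by simp)
        rw [this]
      | some rest =>
        have hA : pvBuildPositions tokens (e :: es) = some (pos :: rest) := by
          simp only [pvBuildPositions, pvFindPositions_eq, ← hposdef, hrest]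
          rw [if_neg (by simp [List.isEmpty_iff, hpe])]
        rw [hA]
        rw [Bool.eq_iff_iff, pvCheckSeq_cons_iff, halt]
        constructor
        · rintro ⟨q, hq, ⟨_, _⟩, hchk⟩
          exact ⟨q, hq, rest, hrest, hchk⟩
        · rintro ⟨q, hq, P, hP, hchk⟩
          rw [hrest] at hP; injection hP with hP; subst hP
          have := pvPosOf_nonneg tokens e q hq
          exact ⟨q, hq, ⟨by omega, Or.inl rfl⟩, hchk⟩
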